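-- pv_equiv track=rewrite | github.com/junwenkwan/aoc-2024 | day_09.py | update_space_dict
-- ===== SOURCE A (Python) =====
-- def update_space_dict(disk_block, index = 0):
--     space_dict = {}
--
--     space_count = 0
--     space_start = False
--     space_start_index = None
--
--     while True:
--         if index == len(disk_block):
--             break
--
--         if disk_block[index] != ".":
--             space_start = True
--
--         if disk_block[index] == ".":
--             if space_start:
--                 space_start_index = index
--             space_start = False
--             space_count += 1
--
--         else:
--             if space_start_index:
--                 space_dict[space_start_index] = space_count
--             space_count = 0
--             space_start_index = None
--
--         index += 1
--
--     return space_dict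
-- ===== SOURCE B (Python) =====
-- def update_space_dict(disk_block, index=0):
--     # Group maximal dot-runs by jumping over each run with an inner scan,
--     # instead of A's per-character flag/counter state machine.
--     space_dict = {}
--     n = len(disk_block)
--     i = index
--     while i < n:
--         if disk_block[i] == ".":
--             j = i
--             while j < n and disk_block[j] == ".":
--                 j += 1
--             if i > index and j < n:
--                 space_dict[i] = j - i
--             i = j
--         else:
--             i += 1
--     return space_dict
-- ===== Notes on version B (the rewrite author's own statement) =====
-- stated objective: simpler
-- what changed: Replaces A's per-character state machine (space_start flag, running counter, optional start index) with a two-level grouping loop that finds each maximal dot-run with an inner scan and records it directly, recording a run iff it starts after the scan start and ends before the list end.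
-- intended difference: When index is negative (wrap-around scan), the list is nonempty, its first element is '.' and its last element is not '.', the scan reaches a recordable dot-run starting at position 0; A's truthiness test 'if space_start_index:' is False for 0 so A silently drops that run, while B records it (e.g. on (['.','x'], -1) A returns {} and B returns {0: 1}), which is the intended behaviour since 0 is a valid start position. — e.g. on update_space_dict([".", "x"], -1): A returns [], B returns [(0, 1)]
import Mathlib
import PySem

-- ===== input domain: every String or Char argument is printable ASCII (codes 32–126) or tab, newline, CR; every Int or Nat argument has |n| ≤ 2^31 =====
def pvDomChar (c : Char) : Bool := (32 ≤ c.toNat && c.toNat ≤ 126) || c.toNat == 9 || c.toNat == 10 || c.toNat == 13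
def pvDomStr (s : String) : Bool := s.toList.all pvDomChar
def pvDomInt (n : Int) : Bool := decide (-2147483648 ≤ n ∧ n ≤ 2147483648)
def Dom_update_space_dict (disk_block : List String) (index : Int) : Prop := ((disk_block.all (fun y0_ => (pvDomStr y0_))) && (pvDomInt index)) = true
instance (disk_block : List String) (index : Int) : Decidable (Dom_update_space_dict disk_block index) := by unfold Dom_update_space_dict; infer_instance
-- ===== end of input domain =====

-- B replaces A's per-character flag/counter state machine with a two-level loop that
-- jumps over each maximal dot-run (objective: simpler); A=B proved outside D_ below.

-- used by the ports' termination proofs (cited in decreasing_by)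
theorem pv_pyGet?_some_bounds {α : Type} (xs : List α) (i : Int) (c : α)
    (h : PySem.List.pyGet? xs i = some c) : -(xs.length : Int) ≤ i ∧ i < (xs.length : Int) := by
  have hiff := (PySem.List.pyGet?_eq_none_iff xs i).2
  by_contra hn
  simp [PySem.Raise.InRange] at hiff hn
  rw [hiff (by omega)] at h
  simp at h

-- ===== PORT A =====
-- A's while-loop: state (space_dict, space_count, space_start, space_start_index, index);
-- pyGet? none = Python's IndexError (excluded by Pre_): the loop result is then unspecified (returns d).
def aLoop (db : List String) (d : PySem.Dict Int Int) (cnt : Int) (st : Bool)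
    (sidx : Option Int) (i : Int) : PySem.Dict Int Int :=
  if i = PySem.List.len db then d
  else
    match h : PySem.List.pyGet? db i with
    | none => d
    | some c =>
      let st1 := if c ≠ "." then true else st
      if c = "." then
        aLoop db d (cnt + 1) false (if st1 then some i else sidx) (i + 1)
      else
        aLoop db (match sidx with
                  | some k => if k ≠ 0 then d.insert k cnt else d  -- `if space_start_index:` — 0 is falsy
                  | none => d) 0 st1 none (i + 1)
  termination_by (PySem.List.len db - i).toNat
  decreasing_by
    · have := pv_pyGet?_some_bounds db i c h
      simp [PySem.List.len_eq]; omega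
    · have := pv_pyGet?_some_bounds db i c h
      simp [PySem.List.len_eq]; omega

def update_space_dict (disk_block : List String) (index : Int) : List (Int × Int) :=
  (aLoop disk_block PySem.Dict.empty 0 false none index).items

-- ===== PORT B =====
-- B's inner while-loop: first position j' ≥ j with j' = len or disk_block[j'] ≠ "."
-- (pyGet? none = Python's IndexError, excluded by Pre_; returns j there).
def bRun (db : List String) (j : Int) : Int :=
  if hj : j < PySem.List.len db then
    match h : PySem.List.pyGet? db j with
    | none => j
    | some c => if c = "." then bRun db (j + 1) else j
  else j
  termination_by (PySem.List.len db - j).toNat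
  decreasing_by simp [PySem.List.len_eq] at hj ⊢; omega

-- cited by bLoop's decreasing_by
theorem bRun_ge (db : List String) (j : Int) : j ≤ bRun db j := by
  rw [bRun]
  split
  · rename_i hj
    cases h : PySem.List.pyGet? db j with
    | none => simp
    | some c =>
      by_cases hc : c = "."
      · simp only [hc, if_pos rfl]
        have := bRun_ge db (j + 1)
        omega
      · simp [hc]
  · simp
  termination_by (PySem.List.len db - j).toNat
  decreasing_by simp [PySem.List.len_eq] at *; omega

theorem bRun_dot (db : List String) (j : Int) (hj : j < (db.length : Int))
    (h : PySem.List.pyGet? db j = some ".") : bRun db j = bRun db (j + 1) := by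
  rw [bRun]
  split
  · cases hg : PySem.List.pyGet? db j with
    | none => rw [hg] at h; cases h
    | some c =>
      rw [hg] at h
      injection h with h
      simp [h]
  · rename_i hn
    rw [PySem.List.len_eq] at hn
    exact absurd hj hn

theorem bRun_gt (db : List String) (j : Int) (hj : j < (db.length : Int))
    (h : PySem.List.pyGet? db j = some ".") : j < bRun db j := by
  rw [bRun_dot db j hj h]
  have := bRun_ge db (j + 1)
  omega

-- B's outer while-loop over positions, with the accumulated dict
def bLoop (db : List String) (index : Int) (d : PySem.Dict Int Int) (i : Int) : PySem.Dict Int Int :=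
  if hi : i < PySem.List.len db then
    match h : PySem.List.pyGet? db i with
    | none => d
    | some c =>
      if hc : c = "." then
        bLoop db index
          (if index < i ∧ bRun db i < PySem.List.len db
           then d.insert i (bRun db i - i) else d) (bRun db i)
      else bLoop db index d (i + 1)
  else d
  termination_by (PySem.List.len db - i).toNat
  decreasing_by
    · have := bRun_gt db i (by simpa [PySem.List.len_eq] using hi) (hc ▸ h)
      simp [PySem.List.len_eq] at *; omega
    · simp [PySem.List.len_eq] at *; omega

def update_space_dict_alt (disk_block : List String) (index : Int) : List (Int × Int) :=
  (bLoop disk_block index PySem.Dict.empty index).items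

-- ===== PRECONDITION & SPEC =====
-- Pre_ is exactly where the Python A returns: disk_block[index] raises IndexError
-- (index > len immediately, index < -len on the first access) unless -len ≤ index ≤ len.
def Pre_update_space_dict (disk_block : List String) (index : Int) : Prop :=
  -(PySem.List.len disk_block) ≤ index ∧ index ≤ PySem.List.len disk_block
instance (disk_block : List String) (index : Int) : Decidable (Pre_update_space_dict disk_block index) := by unfold Pre_update_space_dict; infer_instance

def pvWitness_update_space_dict : List String × Int := (["x", ".", "x"], 0)

-- When index is negative (wrap-around scan), the list starts with "." and does not end with ".",
-- the scan reaches a recordable dot-run starting at position 0; A's truthiness test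
-- `if space_start_index:` is False for 0, so A silently drops that run, while B records it —
-- the intended behaviour, since 0 is a valid run start position.
def D_update_space_dict (disk_block : List String) (index : Int) : Prop :=
  index < 0 ∧ PySem.List.pyGet? disk_block 0 = some "." ∧
    ¬ (PySem.List.pyGet? disk_block (-1) = some ".")
instance (disk_block : List String) (index : Int) : Decidable (D_update_space_dict disk_block index) := by unfold D_update_space_dict; infer_instance

def Spec_update_space_dict (disk_block : List String) (index : Int) (out : List (Int × Int)) : Prop := ¬ D_update_space_dict disk_block index → out = update_space_dict_alt disk_block index
instance (disk_block : List String) (index : Int) (out : List (Int × Int)) : Decidable (Spec_update_space_dict disk_block index out) := by unfold Spec_update_space_dict; infer_instance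

def pvDiffWitness_update_space_dict : List String × Int := ([".", "x"], -1)
def pvDiffWitnessOut_update_space_dict : (List (Int × Int)) × (List (Int × Int)) := ([], [(0, 1)])

-- ===== CLAIM (what is proved, stated in full; the proofs are below) =====
def Claim_unchanged_update_space_dict : Prop := ∀ (disk_block : List String) (index : Int), Dom_update_space_dict disk_block index → Pre_update_space_dict disk_block index → Spec_update_space_dict disk_block index (update_space_dict disk_block index)
def Claim_changed_update_space_dict : Prop := Dom_update_space_dict (pvDiffWitness_update_space_dict.1) (pvDiffWitness_update_space_dict.2) ∧ Pre_update_space_dict (pvDiffWitness_update_space_dict.1) (pvDiffWitness_update_space_dict.2) ∧ D_update_space_dict (pvDiffWitness_update_space_dict.1) (pvDiffWitness_update_space_dict.2) ∧ update_space_dict (pvDiffWitness_update_space_dict.1) (pvDiffWitness_update_space_dict.2) = pvDiffWitnessOut_update_space_dict.1 ∧ update_space_dict_alt (pvDiffWitness_update_space_dict.1) (pvDiffWitness_update_space_dict.2) = pvDiffWitnessOut_update_space_dict.2 ∧ pvDiffWitnessOut_update_space_dict.1 ≠ pvDiffWitnessOut_update_space_dict.2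
def Claim_exact_update_space_dict : Prop := ∀ (disk_block : List String) (index : Int), Dom_update_space_dict disk_block index → Pre_update_space_dict disk_block index → D_update_space_dict disk_block index → update_space_dict disk_block index ≠ update_space_dict_alt disk_block index

-- ===== LEMMAS AND PROOFS =====

-- unfolding equations with plain (non-dependent) matches and cast lengths, used throughout
theorem aLoop_eq (db : List String) (d : PySem.Dict Int Int) (cnt : Int) (st : Bool)
    (sidx : Option Int) (i : Int) :
    aLoop db d cnt st sidx i =
      if i = (db.length : Int) then d
      else
        match PySem.List.pyGet? db i with
        | none => d
        | some c =>
          if c = "." then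
            aLoop db d (cnt + 1) false (if (if c ≠ "." then true else st) then some i else sidx) (i + 1)
          else
            aLoop db (match sidx with
                      | some k => if k ≠ 0 then d.insert k cnt else d
                      | none => d) 0 (if c ≠ "." then true else st) none (i + 1) := by
  rw [aLoop.eq_def]
  simp only [PySem.List.len_eq]
  by_cases hI : i = (db.length : Int)
  · simp [hI]
  · simp only [if_neg hI]
    cases hg : PySem.List.pyGet? db i with
    | none => simp
    | some c => simp

theorem bRun_eq (db : List String) (j : Int) :
    bRun db j =
      if j < (db.length : Int) then
        match PySem.List.pyGet? db j with
        | none => j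
        | some c => if c = "." then bRun db (j + 1) else j
      else j := by
  rw [bRun.eq_def]
  simp only [PySem.List.len_eq]
  by_cases hj : j < (db.length : Int)
  · simp only [dif_pos hj, if_pos hj]
    cases hg : PySem.List.pyGet? db j with
    | none => simp
    | some c => simp
  · simp [hj]

theorem bLoop_eq (db : List String) (index : Int) (d : PySem.Dict Int Int) (i : Int) :
    bLoop db index d i =
      if i < (db.length : Int) then
        match PySem.List.pyGet? db i with
        | none => d
        | some c =>
          if c = "." then
            bLoop db index
              (if index < i ∧ bRun db i < (db.length : Int)
               then d.insert i (bRun db i - i) else d) (bRun db i)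
          else bLoop db index d (i + 1)
      else d := by
  rw [bLoop.eq_def]
  simp only [PySem.List.len_eq]
  by_cases hi : i < (db.length : Int)
  · simp only [dif_pos hi, if_pos hi]
    cases hg : PySem.List.pyGet? db i with
    | none => simp
    | some c =>
      by_cases hc : c = "." <;> simp [hc] <;> rfl
  · simp [hi]

theorem bRun_stop (db : List String) : ∀ (K : Nat) (j : Int), ((db.length : Int) - j).toNat ≤ K →
    -(db.length : Int) ≤ j → bRun db j < (db.length : Int) →
    ∃ c, PySem.List.pyGet? db (bRun db j) = some c ∧ c ≠ "." := by
  intro K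
  induction K with
  | zero =>
    intro j hK hj hlt
    have hge := bRun_ge db j
    omega
  | succ K ih =>
    intro j hK hj hlt
    by_cases hjl : j < (db.length : Int)
    · cases hg : PySem.List.pyGet? db j with
      | none =>
        exfalso
        rw [PySem.List.pyGet?_eq_none_iff] at hg
        exact hg ⟨hj, hjl⟩
      | some c =>
        by_cases hc : c = "."
        · subst hc
          have hd := bRun_dot db j hjl hg
          rw [hd] at hlt ⊢
          exact ih (j + 1) (by omega) (by omega) hlt
        · have hb : bRun db j = j := by
            rw [bRun_eq]
            simp [hjl, hg, hc]
          rw [hb]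
          exact ⟨c, hg, hc⟩
    · have hb : bRun db j = j := by rw [bRun_eq]; simp [hjl]
      omega

-- A's loop mid-run (space_start = False, pending start `some s`): it walks to the end of the
-- dot-run (= bRun) and records the run there iff s ≠ 0 and the run ends inside the list.
theorem aLoop_run (db : List String) : ∀ (K : Nat) (p cnt s : Int) (d : PySem.Dict Int Int),
    ((db.length : Int) - p).toNat ≤ K → -(db.length : Int) ≤ p → p ≤ (db.length : Int) →
    aLoop db d cnt false (some s) p =
      (if bRun db p < (db.length : Int)
       then aLoop db (if s ≠ 0 then d.insert s (cnt + (bRun db p - p)) else d) 0 true none (bRun db p + 1)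
       else d) := by
  intro K
  induction K with
  | zero =>
    intro p cnt s d hK h1 h2
    have hp : p = (db.length : Int) := by omega
    have hb : bRun db p = p := by rw [bRun_eq]; simp [hp]
    rw [aLoop_eq, hb]
    simp [hp]
  | succ K ih =>
    intro p cnt s d hK h1 h2
    by_cases hp : p = (db.length : Int)
    · have hb : bRun db p = p := by rw [bRun_eq]; simp [hp]
      rw [aLoop_eq, hb]
      simp [hp]
    · have hplt : p < (db.length : Int) := by omega
      cases hg : PySem.List.pyGet? db p with
      | none =>
        exfalso
        rw [PySem.List.pyGet?_eq_none_iff] at hg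
        exact hg ⟨by omega, hplt⟩
      | some c =>
        by_cases hc : c = "."
        · -- still inside the run
          subst hc
          rw [aLoop_eq]
          simp only [if_neg hp, hg, if_pos rfl]
          rw [show (if (if ("." : String) ≠ "." then true else false) then some p else some s) = some s by simp]
          rw [ih (p + 1) (cnt + 1) s d (by omega) (by omega) (by omega)]
          rw [← bRun_dot db p hplt hg]
          by_cases hlt : bRun db p < (db.length : Int)
          · simp only [if_pos hlt]
            have hv : cnt + 1 + (bRun db p - (p + 1)) = cnt + (bRun db p - p) := by ring
            rw [hv]
            simp
          · simp [hlt]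
        · -- run ends here: record (if s ≠ 0) and hand control back
          have hb : bRun db p = p := by rw [bRun_eq]; simp [hplt, hg, hc]
          rw [aLoop_eq]
          simp only [if_neg hp, hg, if_neg hc, hb, if_pos hplt]
          rw [show (if (c : String) ≠ "." then true else false) = true by simp [hc]]
          have hv : cnt + (p - p) = cnt := by ring
          rw [hv]

-- same, with no pending start index (the dot-run at the very start of the scan): nothing recorded
theorem aLoop_run0 (db : List String) : ∀ (K : Nat) (p cnt : Int) (d : PySem.Dict Int Int),
    ((db.length : Int) - p).toNat ≤ K → -(db.length : Int) ≤ p → p ≤ (db.length : Int) →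
    aLoop db d cnt false none p =
      (if bRun db p < (db.length : Int)
       then aLoop db d 0 true none (bRun db p + 1)
       else d) := by
  intro K
  induction K with
  | zero =>
    intro p cnt d hK h1 h2
    have hp : p = (db.length : Int) := by omega
    have hb : bRun db p = p := by rw [bRun_eq]; simp [hp]
    rw [aLoop_eq, hb]
    simp [hp]
  | succ K ih =>
    intro p cnt d hK h1 h2
    by_cases hp : p = (db.length : Int)
    · have hb : bRun db p = p := by rw [bRun_eq]; simp [hp]
      rw [aLoop_eq, hb]
      simp [hp]
    · have hplt : p < (db.length : Int) := by omega
      cases hg : PySem.List.pyGet? db p with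
      | none =>
        exfalso
        rw [PySem.List.pyGet?_eq_none_iff] at hg
        exact hg ⟨by omega, hplt⟩
      | some c =>
        by_cases hc : c = "."
        · subst hc
          rw [aLoop_eq]
          simp only [if_neg hp, hg, if_pos rfl]
          rw [show (if (if ("." : String) ≠ "." then true else false) then some p else (none : Option Int)) = none by simp]
          rw [ih (p + 1) (cnt + 1) d (by omega) (by omega) (by omega)]
          rw [← bRun_dot db p hplt hg]
          simp
        · have hb : bRun db p = p := by rw [bRun_eq]; simp [hplt, hg, hc]
          rw [aLoop_eq]
          simp only [if_neg hp, hg, if_neg hc, hb, if_pos hplt]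
          rw [show (if (c : String) ≠ "." then true else false) = true by simp [hc]]

theorem bLoop_skip (db : List String) (index : Int) (d : PySem.Dict Int Int) (j : Int)
    (hj : j < (db.length : Int)) (c : String) (hg : PySem.List.pyGet? db j = some c)
    (hc : c ≠ ".") : bLoop db index d j = bLoop db index d (j + 1) := by
  rw [bLoop_eq]
  simp [hj, hg, hc]

-- main simulation: from any position right after a scanned non-dot element
-- (A-state: count 0, space_start True, no pending index), A's loop equals B's loop
theorem main_sim (db : List String) (index : Int) (hpre : -(db.length : Int) ≤ index)
    (hnd : ¬ D_update_space_dict db index) :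
    ∀ (K : Nat) (i : Int) (d : PySem.Dict Int Int),
    ((db.length : Int) - i).toNat ≤ K → index < i → i ≤ (db.length : Int) →
    (i = 0 → ¬ (PySem.List.pyGet? db (-1) = some ".")) →
    aLoop db d 0 true none i = bLoop db index d i := by
  intro K
  induction K with
  | zero =>
    intro i d hK h1 h2 h3
    have hi : i = (db.length : Int) := by omega
    rw [aLoop_eq, bLoop_eq]
    simp [hi]
  | succ K ih =>
    intro i d hK h1 h2 h3
    by_cases hi : i = (db.length : Int)
    · rw [aLoop_eq, bLoop_eq]; simp [hi]
    · have hilt : i < (db.length : Int) := by omega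
      cases hg : PySem.List.pyGet? db i with
      | none =>
        exfalso
        rw [PySem.List.pyGet?_eq_none_iff] at hg
        exact hg ⟨by omega, hilt⟩
      | some c =>
        by_cases hc : c = "."
        · -- a dot-run starts at i
          subst hc
          have hiz : i ≠ 0 := by
            intro hz
            subst hz
            exact hnd ⟨by omega, hg, h3 rfl⟩
          rw [aLoop_eq, bLoop_eq]
          simp only [if_neg hi, if_pos hilt, hg, if_pos rfl]
          rw [show (if (if ("." : String) ≠ "." then true else true) then some i else (none : Option Int)) = some i by simp]
          simp only [if_true, zero_add]
          rw [aLoop_run db ((db.length : Int) - (i + 1)).toNat (i + 1) 1 i d (by omega) (by omega) (by omega)]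
          rw [← bRun_dot db i hilt hg]
          have hgt := bRun_gt db i hilt hg
          by_cases hlt : bRun db i < (db.length : Int)
          · have hcond : index < i ∧ bRun db i < (db.length : Int) := ⟨h1, hlt⟩
            simp only [if_pos hlt, if_pos hcond, if_pos hiz]
            obtain ⟨c', hg', hc'⟩ := bRun_stop db ((db.length : Int) - i).toNat i (by omega) (by omega) hlt
            rw [bLoop_skip db index _ (bRun db i) hlt c' hg' hc']
            have hv : 1 + (bRun db i - (i + 1)) = bRun db i - i := by ring
            rw [hv]
            exact ih (bRun db i + 1) (d.insert i (bRun db i - i)) (by omega) (by omega) (by omega)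
              (by intro h0
                  have hm : bRun db i = -1 := by omega
                  rw [hm] at hg'
                  rw [hg']
                  simp [hc'])
          · have hcond : ¬ (index < i ∧ bRun db i < (db.length : Int)) := by tauto
            simp only [if_neg hlt, if_neg hcond]
            rw [bLoop_eq]
            simp [hlt]
        · -- a non-dot element: both loops just advance
          rw [aLoop_eq, bLoop_eq]
          simp only [if_neg hi, if_pos hilt, hg, if_neg hc]
          rw [show (if (c : String) ≠ "." then true else true) = true by simp]
          exact ih (i + 1) d (by omega) (by omega) (by omega)
            (by intro h0
                have hm : i = -1 := by omega
                rw [hm] at hg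
                rw [hg]
                simp [hc])

-- the whole entry: A's initial state has space_start = False and no pending index, so the
-- dot-run at the scan start (if any) is skipped by both programs
theorem entry_sim (db : List String) (index : Int) (hnd : ¬ D_update_space_dict db index)
    (h1 : -(db.length : Int) ≤ index) (h2 : index ≤ (db.length : Int))
    (d : PySem.Dict Int Int) :
    aLoop db d 0 false none index = bLoop db index d index := by
  by_cases hi : index = (db.length : Int)
  · rw [aLoop_eq, bLoop_eq]; simp [hi]
  · have hilt : index < (db.length : Int) := by omega
    cases hg : PySem.List.pyGet? db index with
    | none =>
      exfalso
      rw [PySem.List.pyGet?_eq_none_iff] at hg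
      exact hg ⟨by omega, hilt⟩
    | some c =>
      by_cases hc : c = "."
      · subst hc
        rw [aLoop_eq, bLoop_eq]
        simp only [if_neg hi, if_pos hilt, hg, if_pos rfl]
        rw [show (if (if ("." : String) ≠ "." then true else false) then some index else (none : Option Int)) = none by simp]
        simp only [if_true, zero_add]
        rw [aLoop_run0 db ((db.length : Int) - (index + 1)).toNat (index + 1) 1 d (by omega) (by omega) (by omega)]
        rw [← bRun_dot db index hilt hg]
        have hcond : ¬ (index < index ∧ bRun db index < (db.length : Int)) := by simp
        simp only [if_neg hcond]
        have hgt := bRun_gt db index hilt hg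
        by_cases hlt : bRun db index < (db.length : Int)
        · simp only [if_pos hlt]
          obtain ⟨c', hg', hc'⟩ := bRun_stop db ((db.length : Int) - index).toNat index (by omega) (by omega) hlt
          rw [bLoop_skip db index d (bRun db index) hlt c' hg' hc']
          exact main_sim db index h1 hnd ((db.length : Int) - (bRun db index + 1)).toNat (bRun db index + 1) d
            (by omega) (by omega) (by omega)
            (by intro h0
                have hm : bRun db index = -1 := by omega
                rw [hm] at hg'
                rw [hg']
                simp [hc'])
        · simp only [if_neg hlt]
          rw [bLoop_eq]
          simp [hlt]
      · rw [aLoop_eq, bLoop_eq]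
        simp only [if_neg hi, if_pos hilt, hg, if_neg hc]
        rw [show (if (c : String) ≠ "." then true else false) = true by simp [hc]]
        exact main_sim db index h1 hnd ((db.length : Int) - (index + 1)).toNat (index + 1) d
          (by omega) (by omega) (by omega)
          (by intro h0
              have hm : index = -1 := by omega
              rw [hm] at hg
              rw [hg]
              simp [hc])


-- ---- lemmas for the tightness theorem: inside D_, A's result has no key 0 while B's maps 0 ----

-- the inner scan stops no later than the first non-dot position at or after its start
theorem bRun_le_stop (db : List String) : ∀ (K : Nat) (i m : Int), ((db.length : Int) - i).toNat ≤ K →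
    i ≤ m → m < (db.length : Int) → PySem.List.pyGet? db m ≠ some "." → bRun db i ≤ m := by
  intro K
  induction K with
  | zero => intro i m hK him hm hgm; omega
  | succ K ih =>
    intro i m hK him hm hgm
    by_cases hi : i < (db.length : Int)
    · cases hg : PySem.List.pyGet? db i with
      | none => rw [bRun_eq]; simp [hi, hg]; omega
      | some c =>
        by_cases hc : c = "."
        · subst hc
          have hne : i ≠ m := by intro h; rw [h] at hg; exact hgm hg
          rw [bRun_dot db i hi hg]
          exact ih (i + 1) m (by omega) (by omega) hm hgm
        · rw [bRun_eq]; simp [hi, hg, hc]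
          all_goals omega
    · rw [bRun_eq]; simp [hi]; omega

-- B's loop never touches key 0 once past position 0
theorem bLoop_keep (db : List String) (index : Int) : ∀ (K : Nat) (i : Int) (d : PySem.Dict Int Int),
    ((db.length : Int) - i).toNat ≤ K → 1 ≤ i →
    (bLoop db index d i).get? 0 = d.get? 0 := by
  intro K
  induction K with
  | zero =>
    intro i d hK h1
    rw [bLoop_eq]
    simp only [if_neg (by omega : ¬ i < (db.length : Int))]
  | succ K ih =>
    intro i d hK h1
    by_cases hi : i < (db.length : Int)
    · cases hg : PySem.List.pyGet? db i with
      | none => rw [bLoop_eq]; simp [hi, hg]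
      | some c =>
        by_cases hc : c = "."
        · subst hc
          have hgt := bRun_gt db i hi hg
          rw [bLoop_eq]
          simp only [if_pos hi, hg, if_pos rfl, if_true]
          rw [ih (bRun db i) _ (by omega) (by omega)]
          split
          · exact PySem.Dict.get?_insert_of_ne d (bRun db i - i) (by omega)
          · rfl
        · rw [bLoop_eq]
          simp only [if_pos hi, hg, if_neg hc]
          exact ih (i + 1) d (by omega) (by omega)
    · rw [bLoop_eq]; simp [hi]

-- inside D_, B's scan reaches the dot-run starting at 0 and records it
theorem bLoop_hit (db : List String) (index : Int) (hn : 1 ≤ (db.length : Int))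
    (hidx : index < 0) (hpre : -(db.length : Int) ≤ index)
    (hg0 : PySem.List.pyGet? db 0 = some ".")
    (hgl : ¬ PySem.List.pyGet? db (-1) = some ".") :
    ∀ (K : Nat) (i : Int) (d : PySem.Dict Int Int), (0 - i).toNat ≤ K → index ≤ i → i ≤ 0 →
    (bLoop db index d i).get? 0 = some (bRun db 0) := by
  have hlast : PySem.List.pyGet? db ((db.length : Int) - 1) = PySem.List.pyGet? db (-1) := by
    rw [PySem.List.pyGet?_neg_one,
        PySem.List.pyGet?_of_nonneg db (show (0:Int) ≤ (db.length : Int) - 1 by omega)]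
    rw [List.getLast?_eq_getElem?]
    congr 1
    omega
  have hstop : bRun db 0 ≤ (db.length : Int) - 1 :=
    bRun_le_stop db ((db.length : Int)).toNat 0 ((db.length : Int) - 1) (by omega) (by omega)
      (by omega) (by rw [hlast]; exact hgl)
  have hzero : ∀ d : PySem.Dict Int Int, (bLoop db index d 0).get? 0 = some (bRun db 0) := by
    intro d
    have hgt := bRun_gt db 0 (by omega) hg0
    rw [bLoop_eq]
    simp only [if_pos (by omega : (0:Int) < (db.length : Int)), hg0, if_pos rfl, if_true]
    rw [if_pos (show index < 0 ∧ bRun db 0 < (db.length : Int) from ⟨hidx, by omega⟩)]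
    rw [bLoop_keep db index ((db.length : Int) - bRun db 0).toNat (bRun db 0) _ (le_refl _) (by omega)]
    rw [PySem.Dict.get?_insert_self]
    rw [sub_zero]
  intro K
  induction K with
  | zero =>
    intro i d hK h1 h2
    have : i = 0 := by omega
    subst this
    exact hzero d
  | succ K ih =>
    intro i d hK h1 h2
    by_cases hi0 : i = 0
    · subst hi0; exact hzero d
    · have hilt : i < (db.length : Int) := by omega
      cases hg : PySem.List.pyGet? db i with
      | none =>
        exfalso
        rw [PySem.List.pyGet?_eq_none_iff] at hg
        exact hg ⟨by omega, hilt⟩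
      | some c =>
        by_cases hc : c = "."
        · subst hc
          have hgt := bRun_gt db i hilt hg
          have hrun : bRun db i ≤ -1 :=
            bRun_le_stop db ((db.length : Int) - i).toNat i (-1) (le_refl _) (by omega)
              (by omega) hgl
          rw [bLoop_eq]
          simp only [if_pos hilt, hg, if_pos rfl, if_true]
          exact ih (bRun db i) _ (by omega) (by omega) (by omega)
        · rw [bLoop_eq]
          simp only [if_pos hilt, hg, if_neg hc]
          exact ih (i + 1) d (by omega) (by omega) (by omega)

-- A's loop never writes key 0: its record guard `if space_start_index:` rejects 0
theorem aLoop_keep0 (db : List String) : ∀ (K : Nat) (i : Int) (d : PySem.Dict Int Int)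
    (cnt : Int) (st : Bool) (sidx : Option Int), ((db.length : Int) - i).toNat ≤ K →
    (aLoop db d cnt st sidx i).get? 0 = d.get? 0 := by
  intro K
  induction K with
  | zero =>
    intro i d cnt st sidx hK
    rw [aLoop_eq]
    by_cases hi : i = (db.length : Int)
    · simp [hi]
    · have : PySem.List.pyGet? db i = none := by
        rw [PySem.List.pyGet?_eq_none_iff]
        intro hr
        simp only [PySem.Raise.InRange] at hr
        omega
      simp [this, hi]
  | succ K ih =>
    intro i d cnt st sidx hK
    rw [aLoop_eq]
    by_cases hi : i = (db.length : Int)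
    · simp [hi]
    · simp only [if_neg hi]
      cases hg : PySem.List.pyGet? db i with
      | none => rfl
      | some c =>
        have hbd := pv_pyGet?_some_bounds db i c hg
        by_cases hc : c = "."
        · simp only [hc, if_pos rfl]
          exact ih (i + 1) d (cnt + 1) false _ (by omega)
        · simp only [if_neg hc]
          rw [ih (i + 1) _ 0 _ none (by omega)]
          cases sidx with
          | none => rfl
          | some k =>
            by_cases hk : k = 0
            · simp [hk]
            · simp only [if_neg (by simpa using hk), ne_eq, hk, not_false_eq_true, if_true]
              exact PySem.Dict.get?_insert_of_ne d cnt (Ne.symm hk)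

-- ===== VERDICT (by name: the statement is the Claim_ definition above) =====
theorem update_space_dict_spec : Claim_unchanged_update_space_dict := by
  intro db index _ hpre hnd
  unfold update_space_dict update_space_dict_alt
  have h1 : -(db.length : Int) ≤ index := by
    have := hpre.1; simp [PySem.List.len_eq] at this; omega
  have h2 : index ≤ (db.length : Int) := by
    have := hpre.2; simp [PySem.List.len_eq] at this; omega
  exact congrArg PySem.Dict.items (entry_sim db index hnd h1 h2 PySem.Dict.empty)

theorem update_space_dict_changed : Claim_changed_update_space_dict := by
  unfold Claim_changed_update_space_dict
  refine ⟨by decide, by decide, by decide, ?_, ?_, by decide⟩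
  · show update_space_dict [".", "x"] (-1) = []
    simp [update_space_dict, aLoop_eq, PySem.List.pyGet?, PySem.List.pyIdx?,
          PySem.Dict.empty, PySem.Dict.insert, PySem.Dict.items]
  · show update_space_dict_alt [".", "x"] (-1) = [(0, 1)]
    simp [update_space_dict_alt, bLoop_eq, bRun_eq, PySem.List.pyGet?,
          PySem.List.pyIdx?, PySem.Dict.empty, PySem.Dict.insert, PySem.Dict.items,
          PySem.Dict.contains]

theorem update_space_dict_tight : Claim_exact_update_space_dict := by
  intro db index _ hpre hD heq
  unfold D_update_space_dict at hD
  obtain ⟨hidx, hg0, hgl⟩ := hD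
  have hb := pv_pyGet?_some_bounds db 0 "." hg0
  unfold Pre_update_space_dict at hpre
  rw [PySem.List.len_eq] at hpre
  unfold update_space_dict update_space_dict_alt at heq
  have hd : aLoop db PySem.Dict.empty 0 false none index = bLoop db index PySem.Dict.empty index :=
    PySem.Dict.ext heq
  have hA : (aLoop db PySem.Dict.empty 0 false none index).get? 0 = none := by
    rw [aLoop_keep0 db ((db.length : Int) - index).toNat index _ 0 false none (le_refl _)]
    rfl
  rw [hd] at hA
  rw [bLoop_hit db index (by omega) hidx (by omega) hg0 hgl (0 - index).toNat index
      PySem.Dict.empty (le_refl _) (le_refl _) (by omega)] at hA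
  cases hA
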